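-- pv_equiv track=rewrite | github.com/DevBetz/Public-Projects | Python Projects/OtherGames/Farkle/CLI.py | get_scorable_dice
-- ===== SOURCE A (Python) =====
-- from collections import Counter
--
-- def get_scorable_dice(dice):
--     """Return which dice positions are scorable"""
--     scorable = []
--
--     # Check for straight, three pairs, or two triplets
--     if len(dice) == 6:
--         if sorted(dice) == [1, 2, 3, 4, 5, 6]:
--             return list(range(len(dice)))
--
--         dice_counter = Counter(dice)
--
--         values = list(dice_counter.values())
--         if sorted(values) == [2, 2, 2] and len(dice_counter) == 3:
--             return list(range(len(dice)))
--
--         if sorted(values) == [3, 3] and len(dice_counter) == 2: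
--             return list(range(len(dice)))
--
--     # Check for 4, 5, or 6 of a kind
--     dice_counter = Counter(dice)
--     for value, count in dice_counter.items():
--         if count >= 3:
--             positions = [i for i, die in enumerate(dice) if die == value]
--             scorable.extend(positions[:count])  # Take only the count we need
--
--     # Check individual 1's and 5's
--     for i, die in enumerate(dice):
--         if i not in scorable:  # Avoid counting dice twice
--             if die == 1 or die == 5:
--                 scorable.append(i)
--
--     return sorted(scorable)
-- ===== SOURCE B (Python) =====
-- from collections import Counter
--
-- def get_scorable_dice(dice):
--     """Return which dice positions are scorable"""
--     cnt = Counter(dice)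
--     if len(dice) == 6:
--         sig = sorted(cnt.values())
--         if (sig == [1, 1, 1, 1, 1, 1] and sorted(cnt) == [1, 2, 3, 4, 5, 6]) \
--                 or sig == [2, 2, 2] or sig == [3, 3]:
--             return list(range(6))
--     return [i for i, die in enumerate(dice) if cnt[die] >= 3 or die in (1, 5)]
-- ===== Notes on version B (the rewrite author's own statement) =====
-- stated objective: faster
-- what changed: B builds one Counter, detects all three 6-dice jackpots from the sorted count-signature (plus sorted keys for the straight), and replaces A's per-value positions rescan, quadratic 'i not in scorable' membership scan and final sort by a single already-ordered comprehension over enumerate(dice).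
import Mathlib
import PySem

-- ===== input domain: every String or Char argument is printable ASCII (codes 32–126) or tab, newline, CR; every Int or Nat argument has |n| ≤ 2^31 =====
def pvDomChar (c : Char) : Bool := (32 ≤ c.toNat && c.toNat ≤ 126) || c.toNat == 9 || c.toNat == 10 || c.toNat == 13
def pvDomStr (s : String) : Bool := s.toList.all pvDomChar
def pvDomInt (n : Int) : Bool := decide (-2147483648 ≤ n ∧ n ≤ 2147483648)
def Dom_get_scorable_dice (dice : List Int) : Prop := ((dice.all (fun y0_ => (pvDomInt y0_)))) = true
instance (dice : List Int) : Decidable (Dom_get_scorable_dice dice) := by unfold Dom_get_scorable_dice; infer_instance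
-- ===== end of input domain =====

-- B detects the 6-dice jackpots from the counter's sorted count-signature and replaces A's
-- triplet loop, 1/5 membership scan and final sort by one ordered pass over enumerate(dice) (objective: faster; measured).


-- ===== PORT A =====
-- fall-through part of A (the code after the 6-dice special-case early returns)
def pvScoreCore (dice : List Int) : List Int :=
  let dice_counter := PySem.Dict.counter dice
  let scorable : List Int := dice_counter.items.foldl (fun sc p =>
    if 3 ≤ p.2 then
      let positions := (PySem.List.enumerate dice 0).foldl
        (fun acc q => if q.2 = p.1 then acc ++ [q.1] else acc) []
      sc ++ PySem.List.slice positions none (some p.2)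
    else sc) []
  let scorable := (PySem.List.enumerate dice 0).foldl (fun sc q =>
    if ¬ (q.1 ∈ sc) then (if q.2 = 1 ∨ q.2 = 5 then sc ++ [q.1] else sc) else sc) scorable
  PySem.List.sorted scorable (fun x => x)

def get_scorable_dice (dice : List Int) : List Int :=
  if dice.length = 6 then
    if PySem.List.sorted dice (fun x => x) = [1, 2, 3, 4, 5, 6] then
      PySem.List.pyRange 0 (dice.length : Int) 1
    else
      let dice_counter := PySem.Dict.counter dice
      let values := dice_counter.values
      if PySem.List.sorted values (fun x => x) = [2, 2, 2] ∧ dice_counter.size = 3 then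
        PySem.List.pyRange 0 (dice.length : Int) 1
      else if PySem.List.sorted values (fun x => x) = [3, 3] ∧ dice_counter.size = 2 then
        PySem.List.pyRange 0 (dice.length : Int) 1
      else pvScoreCore dice
  else pvScoreCore dice

-- ===== PORT B =====
def get_scorable_dice_alt (dice : List Int) : List Int :=
  let cnt := PySem.Dict.counter dice
  if dice.length = 6 then
    let sig := PySem.List.sorted cnt.values (fun x => x)
    if (sig = [1, 1, 1, 1, 1, 1] ∧ PySem.List.sorted cnt.keys (fun x => x) = [1, 2, 3, 4, 5, 6])
        ∨ sig = [2, 2, 2] ∨ sig = [3, 3] then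
      PySem.List.pyRange 0 6 1
    else
      (PySem.List.enumerate dice 0).foldl
        (fun acc q => if 3 ≤ cnt.getD q.2 0 ∨ q.2 = 1 ∨ q.2 = 5 then acc ++ [q.1] else acc) []
  else
    (PySem.List.enumerate dice 0).foldl
      (fun acc q => if 3 ≤ cnt.getD q.2 0 ∨ q.2 = 1 ∨ q.2 = 5 then acc ++ [q.1] else acc) []

-- ===== PRECONDITION & SPEC =====
def Spec_get_scorable_dice (dice : List Int) (out : List Int) : Prop := out = get_scorable_dice_alt dice
instance (dice : List Int) (out : List Int) : Decidable (Spec_get_scorable_dice dice out) := by unfold Spec_get_scorable_dice; infer_instance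

-- ===== CLAIM (what is proved, stated in full; the proofs are below) =====
def Claim_equal_get_scorable_dice : Prop := ∀ (dice : List Int), Dom_get_scorable_dice dice → Spec_get_scorable_dice dice (get_scorable_dice dice)

-- ===== LEMMAS AND PROOFS =====

-- indices of the dice equal to v, in order (A's 'positions' comprehension)
def pvPos (dice : List Int) (v : Int) : List Int :=
  ((PySem.List.enumerate dice 0).filter (fun q => q.2 == v)).map (·.1)

-- phase-1 result of A's core (the triplet loop)
def pvS1 (dice : List Int) : List Int :=
  (PySem.Set.ofList dice).flatMap
    (fun v => if 3 ≤ (dice.count v : Int) then pvPos dice v else [])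

-- B's comprehension, with the counter lookup replaced by List.count
def pvB (dice : List Int) : List Int :=
  ((PySem.List.enumerate dice 0).filter
    (fun q => decide (3 ≤ (dice.count q.2 : Int)) || q.2 == 1 || q.2 == 5)).map (·.1)

theorem pvMem_pos (dice : List Int) (v i : Int) :
    i ∈ pvPos dice v ↔ ∃ (k : Nat), ∃ (h : k < dice.length), i = (k : Int) ∧ dice[k] = v := by
  unfold pvPos
  simp only [List.mem_map, List.mem_filter, PySem.List.mem_enumerate_iff]
  constructor
  · rintro ⟨q, ⟨⟨k, hk, rfl⟩, hv⟩, rfl⟩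
    refine ⟨k, hk, by simp, by simpa using hv⟩
  · rintro ⟨k, hk, rfl, hv⟩
    exact ⟨((k : Int), dice[k]), ⟨⟨k, hk, by simp⟩, by simpa using hv⟩, rfl⟩

theorem pvPairwise_pos (dice : List Int) (v : Int) : (pvPos dice v).Pairwise (· < ·) := by
  unfold pvPos
  refine List.Pairwise.map _ (fun p q h => h) ?_
  exact (PySem.List.pairwise_lt_enumerate dice 0).filter _

theorem pvLen_pos (dice : List Int) (v : Int) : (pvPos dice v).length = dice.count v := by
  unfold pvPos
  rw [List.length_map, ← List.countP_eq_length_filter]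
  have h2 : dice = (PySem.List.enumerate dice 0).map (·.2) := (PySem.List.map_snd_enumerate dice 0).symm
  conv_rhs => rw [h2]
  rw [List.count_eq_countP, List.countP_map]
  rfl

theorem pvMem_S1 (dice : List Int) (i : Int) :
    i ∈ pvS1 dice ↔ ∃ (k : Nat), ∃ (h : k < dice.length), i = (k : Int) ∧ 3 ≤ (dice.count dice[k] : Int) := by
  unfold pvS1
  simp only [List.mem_flatMap, PySem.Set.mem_ofList]
  constructor
  · rintro ⟨v, hv, hi⟩
    split at hi
    · rename_i h3
      obtain ⟨k, hk, rfl, hdv⟩ := (pvMem_pos dice v i).1 hi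
      exact ⟨k, hk, rfl, by rwa [hdv]⟩
    · simp at hi
  · rintro ⟨k, hk, rfl, h3⟩
    refine ⟨dice[k], List.getElem_mem hk, ?_⟩
    rw [if_pos h3]
    exact (pvMem_pos dice dice[k] k).2 ⟨k, hk, rfl, rfl⟩

theorem pvNodup_S1 (dice : List Int) : (pvS1 dice).Nodup := by
  unfold pvS1
  rw [List.nodup_flatMap]
  constructor
  · intro v _
    split
    · exact List.Pairwise.imp (fun h => ne_of_lt h) (pvPairwise_pos dice v)
    · exact List.nodup_nil
  · refine (PySem.Set.nodup_ofList dice).imp ?_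
    intro v w hvw i hi hi'
    beta_reduce at hi hi'
    split at hi; swap
    · simp at hi
    split at hi'; swap
    · simp at hi'
    obtain ⟨k, hk, rfl, hdv⟩ := (pvMem_pos dice v i).1 hi
    obtain ⟨k', hk', hkk, hdw⟩ := (pvMem_pos dice w _).1 hi'
    have : k = k' := by exact_mod_cast hkk
    subst this
    exact hvw (hdv ▸ hdw ▸ rfl)

-- the 'positions' comprehension loop computes pvPos
theorem pvPosFold (dice : List Int) (v : Int) :
    (PySem.List.enumerate dice 0).foldl (fun acc q => if q.2 = v then acc ++ [q.1] else acc) []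
      = pvPos dice v := by
  unfold pvPos
  have h := PySem.List.foldl_append_if (fun q : Int × Int => q.2 == v) (·.1) (PySem.List.enumerate dice 0) []
  rw [List.nil_append] at h
  rw [← h]
  apply PySem.List.foldl_congr_mem
  intro acc q _
  by_cases h : q.2 = v <;> simp [h]

-- phase 1 of A computes pvS1
theorem pvPhase1 (dice : List Int) :
    (PySem.Dict.counter dice).items.foldl (fun sc p =>
      if 3 ≤ p.2 then
        sc ++ PySem.List.slice ((PySem.List.enumerate dice 0).foldl
          (fun acc q => if q.2 = p.1 then acc ++ [q.1] else acc) []) none (some p.2)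
      else sc) [] = pvS1 dice := by
  rw [PySem.Dict.items_counter, List.foldl_map]
  unfold pvS1
  have h := PySem.List.foldl_append_eq_flatMap
    (fun v => if 3 ≤ (dice.count v : Int) then pvPos dice v else []) (PySem.Set.ofList dice) []
  rw [List.nil_append] at h
  rw [← h]
  apply PySem.List.foldl_congr_mem
  intro acc v _
  simp only []
  by_cases h3 : 3 ≤ ((dice.count v : Int))
  · rw [if_pos h3, if_pos h3, pvPosFold,
      PySem.List.slice_to _ (by omega), Int.toNat_natCast, ← pvLen_pos dice v, List.take_length]
  · rw [if_neg h3, if_neg h3, List.append_nil]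

-- phase 2 of A: it appends exactly the fresh 1/5 positions
theorem pvPhase2 (xs : List Int) (s : Int) (acc : List Int) :
    (PySem.List.enumerate xs s).foldl (fun sc q =>
      if ¬ (q.1 ∈ sc) then (if q.2 = 1 ∨ q.2 = 5 then sc ++ [q.1] else sc) else sc) acc
    = acc ++ ((PySem.List.enumerate xs s).filter
        (fun q => !(acc.contains q.1) && (q.2 == 1 || q.2 == 5))).map (·.1) := by
  induction xs generalizing s acc with
  | nil => simp [PySem.List.enumerate]
  | cons x xs ih =>
    rw [PySem.List.enumerate_cons]
    simp only [List.foldl_cons, List.filter_cons]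
    have hcongr : ∀ (a : List Int), (∀ q ∈ PySem.List.enumerate xs (s+1), a.contains q.1 = acc.contains q.1) →
        ((PySem.List.enumerate xs (s+1)).filter (fun q => !(a.contains q.1) && (q.2 == 1 || q.2 == 5)))
        = ((PySem.List.enumerate xs (s+1)).filter (fun q => !(acc.contains q.1) && (q.2 == 1 || q.2 == 5))) := by
      intro a ha
      apply List.filter_congr
      intro q hq
      rw [ha q hq]
    by_cases hmem : (s ∈ acc)
    · have hc : (acc.contains s) = true := by simpa using hmem
      simp only [hmem, not_true, if_false, hc]
      rw [ih (s+1) acc]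
      simp
    · have hc : (acc.contains s) = false := by simpa using hmem
      simp only [hmem, not_false_iff, if_true, hc]
      by_cases hx : x = 1 ∨ x = 5
      · have hxb : ((x == 1 || x == 5) : Bool) = true := by
          rcases hx with h | h <;> simp [h]
        rw [if_pos hx, ih (s+1) (acc ++ [s])]
        rw [hcongr (acc ++ [s]) ?_]
        · simp [hxb]
        · intro q hq
          rw [PySem.List.mem_enumerate_iff] at hq
          obtain ⟨k, hk, rfl⟩ := hq
          have : (s + 1 + (k : Int)) ≠ s := by omega
          simp [this]
      · have hxb : ((x == 1 || x == 5) : Bool) = false := by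
          simp only [Bool.or_eq_false_iff, beq_eq_false_iff_ne]
          exact ⟨fun h => hx (Or.inl h), fun h => hx (Or.inr h)⟩
        rw [if_neg hx, ih (s+1) acc]
        simp [hxb]

-- A's second phase appendix, explicitly
def pvT (dice : List Int) : List Int :=
  ((PySem.List.enumerate dice 0).filter
    (fun q => !((pvS1 dice).contains q.1) && (q.2 == 1 || q.2 == 5))).map (·.1)

theorem pvMem_T (dice : List Int) (i : Int) :
    i ∈ pvT dice ↔ ∃ (k : Nat), ∃ (h : k < dice.length),
      i = (k : Int) ∧ i ∉ pvS1 dice ∧ (dice[k] = 1 ∨ dice[k] = 5) := by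
  unfold pvT
  simp only [List.mem_map, List.mem_filter, PySem.List.mem_enumerate_iff]
  constructor
  · rintro ⟨q, ⟨⟨k, hk, rfl⟩, hcond⟩, rfl⟩
    simp only [Bool.and_eq_true, Bool.not_eq_true', Bool.or_eq_true, beq_iff_eq,
      List.contains_eq_mem, decide_eq_false_iff_not] at hcond
    exact ⟨k, hk, by simp, by simpa using hcond.1, hcond.2⟩
  · rintro ⟨k, hk, rfl, hnS, hx⟩
    refine ⟨((k : Int), dice[k]), ⟨⟨k, hk, by simp⟩, ?_⟩, rfl⟩
    simp only [Bool.and_eq_true, Bool.not_eq_true', Bool.or_eq_true, beq_iff_eq,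
      List.contains_eq_mem, decide_eq_false_iff_not]
    exact ⟨by simpa using hnS, hx⟩

theorem pvPairwise_T (dice : List Int) : (pvT dice).Pairwise (· < ·) := by
  unfold pvT
  refine List.Pairwise.map _ (fun p q h => h) ?_
  exact (PySem.List.pairwise_lt_enumerate dice 0).filter _

theorem pvMem_B (dice : List Int) (i : Int) :
    i ∈ pvB dice ↔ ∃ (k : Nat), ∃ (h : k < dice.length),
      i = (k : Int) ∧ (3 ≤ (dice.count dice[k] : Int) ∨ dice[k] = 1 ∨ dice[k] = 5) := by
  unfold pvB
  simp only [List.mem_map, List.mem_filter, PySem.List.mem_enumerate_iff]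
  constructor
  · rintro ⟨q, ⟨⟨k, hk, rfl⟩, hcond⟩, rfl⟩
    simp only [Bool.or_eq_true, beq_iff_eq, decide_eq_true_eq] at hcond
    refine ⟨k, hk, by simp, ?_⟩
    simpa [or_assoc] using hcond
  · rintro ⟨k, hk, rfl, hcond⟩
    refine ⟨((k : Int), dice[k]), ⟨⟨k, hk, by simp⟩, ?_⟩, rfl⟩
    simp only [Bool.or_eq_true, beq_iff_eq, decide_eq_true_eq]
    simpa [or_assoc] using hcond

theorem pvPairwise_B (dice : List Int) : (pvB dice).Pairwise (· < ·) := by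
  unfold pvB
  refine List.Pairwise.map _ (fun p q h => h) ?_
  exact (PySem.List.pairwise_lt_enumerate dice 0).filter _

-- A's core equals B's comprehension
theorem pvCore_eq_B (dice : List Int) : pvScoreCore dice = pvB dice := by
  unfold pvScoreCore
  simp only []
  rw [pvPhase1, pvPhase2]
  apply PySem.List.sorted_eq_of_perm_of_pairwise_lt
  · rw [List.perm_ext_iff_of_nodup (pvPairwise_B dice).nodup ?_]
    · intro i
      rw [pvMem_B, List.mem_append, pvMem_S1, ← pvT, pvMem_T]
      constructor
      · rintro ⟨k, hk, rfl, h3 | hx⟩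
        · exact Or.inl ⟨k, hk, rfl, h3⟩
        · by_cases hS : ((k : Int)) ∈ pvS1 dice
          · exact Or.inl ((pvMem_S1 dice _).1 hS)
          · exact Or.inr ⟨k, hk, rfl, hS, hx⟩
      · rintro (⟨k, hk, rfl, h3⟩ | ⟨k, hk, rfl, _, hx⟩)
        · exact ⟨k, hk, rfl, Or.inl h3⟩
        · exact ⟨k, hk, rfl, Or.inr hx⟩
    · refine List.Nodup.append (pvNodup_S1 dice) (pvPairwise_T dice).nodup ?_
      intro a haS haT
      obtain ⟨k, hk, rfl, hnS, _⟩ := (pvMem_T dice a).1 haT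
      exact hnS haS
  · exact pvPairwise_B dice

-- B's fold is pvB
theorem pvBfold (dice : List Int) :
    (PySem.List.enumerate dice 0).foldl
      (fun acc q => if 3 ≤ (PySem.Dict.counter dice).getD q.2 0 ∨ q.2 = 1 ∨ q.2 = 5 then acc ++ [q.1] else acc) []
      = pvB dice := by
  unfold pvB
  have h := PySem.List.foldl_append_if
    (fun q : Int × Int => decide (3 ≤ (dice.count q.2 : Int)) || q.2 == 1 || q.2 == 5)
    (·.1) (PySem.List.enumerate dice 0) []
  rw [List.nil_append] at h
  rw [← h]
  apply PySem.List.foldl_congr_mem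
  intro acc q _
  rw [PySem.Dict.getD_counter]
  by_cases h : 3 ≤ ((dice.count q.2 : Int)) ∨ q.2 = 1 ∨ q.2 = 5
  · rw [if_pos h, if_pos (by simpa [or_assoc] using h)]
  · rw [if_neg h, if_neg (by simpa [or_assoc] using h)]

theorem pvValues_counter (dice : List Int) :
    (PySem.Dict.counter dice).values
      = (PySem.Set.ofList dice).map (fun k => ((dice.count k : Int))) := by
  show (PySem.Dict.counter dice).items.map (·.2) = _
  rw [PySem.Dict.items_counter, List.map_map]
  rfl

theorem pvSize_counter (dice : List Int) :
    (PySem.Dict.counter dice).size = (PySem.Set.ofList dice).length := by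
  show (PySem.Dict.counter dice).items.length = _
  rw [PySem.Dict.items_counter, List.length_map]

-- the straight test equals the count-signature + sorted-keys test
theorem pvStraight (dice : List Int) :
    PySem.List.sorted dice (fun x => x) = [1, 2, 3, 4, 5, 6]
    ↔ (PySem.List.sorted (PySem.Dict.counter dice).values (fun x => x) = [1, 1, 1, 1, 1, 1]
        ∧ PySem.List.sorted (PySem.Dict.counter dice).keys (fun x => x) = [1, 2, 3, 4, 5, 6]) := by
  rw [pvValues_counter, PySem.Dict.keys_counter]
  constructor
  · intro h
    have hperm : List.Perm [1, 2, 3, 4, 5, 6] dice := by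
      have := PySem.List.sorted_perm dice (fun x => x) false
      rwa [h] at this
    have hcnt : ∀ v : Int, dice.count v = List.count v [1, 2, 3, 4, 5, 6] :=
      fun v => (hperm.symm.count_eq v)
    have hK : List.Perm [1, 2, 3, 4, 5, 6] (PySem.Set.ofList dice) := by
      rw [List.perm_ext_iff_of_nodup (by decide) (PySem.Set.nodup_ofList dice)]
      intro a
      rw [PySem.Set.mem_ofList]
      exact ⟨fun ha => hperm.mem_iff.1 ha, fun ha => hperm.mem_iff.2 ha⟩
    constructor
    · have hV : (PySem.Set.ofList dice).map (fun k => ((dice.count k : Int))) = List.replicate 6 1 := by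
        have hlen6 : (PySem.Set.ofList dice).length = 6 := by
          have := hK.length_eq; simpa using this.symm
        have := List.eq_replicate_of_mem (l := (PySem.Set.ofList dice).map (fun k => ((dice.count k : Int)))) (a := (1:Int)) ?_
        · rwa [List.length_map, hlen6] at this
        · intro b hb
          obtain ⟨k, hk, rfl⟩ := List.mem_map.1 hb
          have hk6 : k ∈ [1, 2, 3, 4, 5, 6] := hK.mem_iff.2 hk
          rw [hcnt k, List.count_eq_one_of_mem (by decide) hk6]
          rfl
      rw [hV]; decide
    · exact PySem.List.sorted_eq_of_perm_of_pairwise_lt _ _ _ hK (by decide)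
  · rintro ⟨hv, hk⟩
    have hKperm : List.Perm [1, 2, 3, 4, 5, 6] (PySem.Set.ofList dice) := by
      have := PySem.List.sorted_perm (PySem.Set.ofList dice) (fun x => x) false
      rwa [hk] at this
    have hVperm : List.Perm ([1, 1, 1, 1, 1, 1] : List Int)
        ((PySem.Set.ofList dice).map (fun k => ((dice.count k : Int)))) := by
      have := PySem.List.sorted_perm ((PySem.Set.ofList dice).map (fun k => ((dice.count k : Int)))) (fun x => x) false
      rwa [hv] at this
    have hone : ∀ k ∈ PySem.Set.ofList dice, dice.count k = 1 := by
      intro k hk'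
      have : ((dice.count k : Int)) ∈ ([1, 1, 1, 1, 1, 1] : List Int) :=
        hVperm.mem_iff.2 (List.mem_map.2 ⟨k, hk', rfl⟩)
      simp at this
      exact_mod_cast this
    have hperm : List.Perm [1, 2, 3, 4, 5, 6] dice := by
      rw [List.perm_iff_count]
      intro a
      by_cases ha : a ∈ dice
      · have haK : a ∈ PySem.Set.ofList dice := (PySem.Set.mem_ofList _ _).2 ha
        rw [List.count_eq_one_of_mem (by decide) (hKperm.mem_iff.2 haK), hone a haK]
      · have haK : a ∉ PySem.Set.ofList dice := fun h => ha ((PySem.Set.mem_ofList _ _).1 h)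
        rw [List.count_eq_zero.2 ha, List.count_eq_zero.2 (fun h => haK (hKperm.mem_iff.1 h))]
    exact PySem.List.sorted_eq_of_perm_of_pairwise_lt _ _ _ hperm (by decide)

-- the size conjuncts of A's pair/triplet tests are implied by the signature
theorem pvSigSize (dice : List Int) (sig : List Int)
    (h : PySem.List.sorted (PySem.Dict.counter dice).values (fun x => x) = sig) :
    (PySem.Dict.counter dice).size = sig.length := by
  rw [pvSize_counter]
  have := PySem.List.sorted_perm (PySem.Dict.counter dice).values (fun x => x) false
  rw [h] at this
  have hlen := this.length_eq
  rw [pvValues_counter, List.length_map] at hlen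
  omega

-- ===== VERDICT (by name: the statement is the Claim_ definition above) =====
theorem get_scorable_dice_spec : Claim_equal_get_scorable_dice := by
  intro dice _
  unfold Spec_get_scorable_dice get_scorable_dice get_scorable_dice_alt
  by_cases hlen : dice.length = 6
  · simp only [hlen, if_true]
    have hrange : PySem.List.pyRange 0 ((6 : Nat) : Int) 1 = PySem.List.pyRange 0 6 1 := by norm_num
    by_cases h1 : PySem.List.sorted dice (fun x => x) = [1, 2, 3, 4, 5, 6]
    · rw [if_pos h1, if_pos (Or.inl ((pvStraight dice).1 h1))]
      exact hrange
    · rw [if_neg h1]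
      by_cases h2 : PySem.List.sorted (PySem.Dict.counter dice).values (fun x => x) = [2, 2, 2]
      · rw [if_pos ⟨h2, pvSigSize dice _ h2⟩, if_pos (Or.inr (Or.inl h2))]
        exact hrange
      · rw [if_neg (fun hc => h2 hc.1)]
        by_cases h3 : PySem.List.sorted (PySem.Dict.counter dice).values (fun x => x) = [3, 3]
        · rw [if_pos ⟨h3, pvSigSize dice _ h3⟩, if_pos (Or.inr (Or.inr h3))]
          exact hrange
        · rw [if_neg (fun hc => h3 hc.1)]
          rw [if_neg ?_]
          · rw [pvCore_eq_B, pvBfold]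
          · rintro (hc | hc | hc)
            · exact h1 ((pvStraight dice).2 hc)
            · exact h2 hc
            · exact h3 hc
  · simp only [if_neg hlen]
    rw [pvCore_eq_B, pvBfold]
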